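-- pv_equiv track=rewrite | github.com/mbianchidev/engineering-interviews | coding-challenges/2024/AWS/real_challenge.py | reducegifts
-- ===== SOURCE A (Python) =====
-- def reducegifts(prices, k, threshold):
--     prices.sort(reverse=True)
--     removed_count = 0
--     while len(prices) >= k:
--         if sum(prices[:k]) <= threshold:
--             break
--         prices.pop(0)
--         removed_count += 1
--     return removed_count
-- ===== SOURCE B (Python) =====
-- def reducegifts(prices, k, threshold):
--     s = sorted(prices, reverse=True)
--     n = len(s)
--     if n < k:
--         return 0
--     window = sum(s[:k])
--     for i in range(n - k):
--         if window <= threshold: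
--             return i
--         window += s[i + k] - s[i]
--     return n - k if window <= threshold else n - k + 1
-- ===== Notes on version B (the rewrite author's own statement) =====
-- stated objective: faster
-- what changed: A repeatedly re-sums the k largest remaining prices and pops the front (O(n*k)); B sorts once and slides a constant-time-updated window sum over the sorted list, returning the first window index within the threshold.
-- outside the precondition, e.g. on reducegifts([5, 5, 5], -1, 3): A returns 2, B raises IndexError; on reducegifts([4, 4], -3, 0): A returns 0, B returns 0
import Mathlib
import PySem

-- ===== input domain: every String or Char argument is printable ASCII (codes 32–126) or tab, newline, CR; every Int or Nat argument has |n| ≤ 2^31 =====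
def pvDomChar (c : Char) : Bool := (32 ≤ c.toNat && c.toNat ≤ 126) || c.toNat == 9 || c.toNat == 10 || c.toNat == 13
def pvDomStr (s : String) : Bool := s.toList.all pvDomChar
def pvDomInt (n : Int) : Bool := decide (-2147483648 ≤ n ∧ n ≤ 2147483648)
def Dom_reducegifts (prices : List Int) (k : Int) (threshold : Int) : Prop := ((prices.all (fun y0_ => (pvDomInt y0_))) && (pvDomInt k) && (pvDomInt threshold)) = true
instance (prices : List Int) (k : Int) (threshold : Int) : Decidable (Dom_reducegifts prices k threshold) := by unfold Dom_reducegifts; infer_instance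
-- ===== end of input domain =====

-- B sorts once and scans prefix-sum window sums instead of A's re-sum-and-pop loop.
-- A mutates its argument (sorts and pops it); B does not: the equivalence proved here is about the return value only.

-- ===== PORT A =====
-- while len(prices) >= k: if sum(prices[:k]) <= threshold: break; prices.pop(0); removed += 1
def reducegiftsAux (k threshold : Int) (ps : List Int) (removed : Int) : Int :=
  if (ps.length : Int) ≥ k then
    if (PySem.List.slice ps none (some k)).sum ≤ threshold then removed
    else
      match ps with
      | [] => removed            -- Python raises IndexError here (prices.pop(0) on []); outside Pre_
      | _ :: rest => reducegiftsAux k threshold rest (removed + 1)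
  else removed
termination_by ps.length

def reducegifts (prices : List Int) (k : Int) (threshold : Int) : Int :=
  reducegiftsAux k threshold (PySem.List.sorted prices (fun x => x) true) 0

-- ===== PORT B =====
-- window = sum(s[:k]); for i in range(n-k): if window <= threshold: return i; window += s[i+k]-s[i]
-- return n-k if window <= threshold else n-k+1
def altWindowLoop (s : List Int) (k threshold n : Int) (window : Int) (idxs : List Int) : Int :=
  match idxs with
  | [] => if window ≤ threshold then n - k else n - k + 1
  | i :: rest =>
    if window ≤ threshold then i
    else altWindowLoop s k threshold n
      (window + (PySem.List.pyGet? s (i + k)).getD 0 - (PySem.List.pyGet? s i).getD 0) rest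

def reducegifts_alt (prices : List Int) (k : Int) (threshold : Int) : Int :=
  let s := PySem.List.sorted prices (fun x => x) true
  let n : Int := s.length
  if n < k then 0
  else altWindowLoop s k threshold n ((PySem.List.slice s none (some k)).sum)
    (PySem.List.pyRange 0 (n - k) 1)

-- ===== PRECONDITION & SPEC =====
-- Pre_ excludes negative k, outside the natural domain of a count of top gifts (there A's slice
-- prices[:k] counts from the END of the list, a negative-slice accident, and A raises IndexError
-- when threshold < 0), and k = 0 with threshold < 0, where A pops from an emptied list and raises.
def Pre_reducegifts (prices : List Int) (k : Int) (threshold : Int) : Prop := 1 ≤ k ∨ (k = 0 ∧ 0 ≤ threshold)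
instance (prices : List Int) (k : Int) (threshold : Int) : Decidable (Pre_reducegifts prices k threshold) := by unfold Pre_reducegifts; infer_instance

def pvWitness_reducegifts : List Int × Int × Int := ([7, 3, 5, 2], 2, 9)

def Spec_reducegifts (prices : List Int) (k : Int) (threshold : Int) (out : Int) : Prop := out = reducegifts_alt prices k threshold
instance (prices : List Int) (k : Int) (threshold : Int) (out : Int) : Decidable (Spec_reducegifts prices k threshold out) := by unfold Spec_reducegifts; infer_instance

-- ===== CLAIM =====
def Claim_equal_reducegifts : Prop := ∀ (prices : List Int) (k : Int) (threshold : Int), Dom_reducegifts prices k threshold → Pre_reducegifts prices k threshold → Spec_reducegifts prices k threshold (reducegifts prices k threshold)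


-- ===== LEMMAS AND PROOFS =====

-- G: the common recursive description of the count (proof helper)
def G (k th : Int) : List Int → Int
  | [] => 0
  | p :: t =>
    if ((p :: t).length : Int) < k then 0
    else if ((p :: t).take k.toNat).sum ≤ th then 0
    else 1 + G k th t

lemma G_small (k th : Int) (s : List Int) (h : (s.length : Int) < k) : G k th s = 0 := by
  cases s with
  | nil => rfl
  | cons p t => simp only [G, if_pos h]

lemma aux_eq_G (k th : Int) (hk : 1 ≤ k) : ∀ (s : List Int) (r : Int),
    reducegiftsAux k th s r = r + G k th s := by
  intro s
  induction s with
  | nil =>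
    intro r
    rw [reducegiftsAux]
    simp [G]
  | cons p t ih =>
    intro r
    rw [reducegiftsAux]
    by_cases hlen : ((p :: t).length : Int) ≥ k
    · rw [if_pos hlen]
      rw [PySem.List.slice_to (p :: t) (by omega : (0:Int) ≤ k)]
      by_cases hsum : ((p :: t).take k.toNat).sum ≤ th
      · rw [if_pos hsum]
        simp only [G]
        rw [if_neg (not_lt.mpr hlen), if_pos hsum]
        ring
      · rw [if_neg hsum]
        rw [ih]
        simp only [G]
        rw [if_neg (not_lt.mpr hlen), if_neg hsum]
        ring
    · rw [if_neg hlen]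
      rw [G_small k th _ (by omega)]
      omega

-- F: first index in [a, b) satisfying P, else b (proof helper)
def F (P : Int → Bool) (a b : Int) : Int :=
  if a < b then (if P a then a else F P (a + 1) b) else b
termination_by (b - a).toNat
decreasing_by omega

lemma F_eq (P : Int → Bool) (a b : Int) :
    F P a b = if a < b then (if P a then a else F P (a + 1) b) else b := by
  rw [F]

lemma F_congr (P Q : Int → Bool) : ∀ (a b : Int), (∀ i, a ≤ i → i < b → P i = Q i) →
    F P a b = F Q a b := by
  intro a b
  induction hn : (b - a).toNat generalizing a with
  | zero =>
    intro _
    rw [F_eq P a b, if_neg (show ¬ a < b by omega), F_eq Q a b, if_neg (show ¬ a < b by omega)]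
  | succ n ih =>
    intro h
    rw [F_eq P a b, if_pos (show a < b by omega), F_eq Q a b, if_pos (show a < b by omega)]
    rw [h a le_rfl (by omega)]
    by_cases hq : Q a
    · simp [hq]
    · simp only [hq]
      exact ih (a + 1) (by omega) (fun i h1 h2 => h i (by omega) h2)

lemma F_shift (P : Int → Bool) : ∀ (a b : Int),
    F P (a + 1) (b + 1) = 1 + F (fun i => P (i + 1)) a b := by
  intro a b
  induction hn : (b - a).toNat generalizing a with
  | zero =>
    rw [F_eq P (a + 1) (b + 1), if_neg (show ¬ a + 1 < b + 1 by omega), F_eq (fun i => P (i + 1)) a b, if_neg (show ¬ a < b by omega)]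
    omega
  | succ n ih =>
    rw [F_eq P (a + 1) (b + 1), if_pos (show a + 1 < b + 1 by omega), F_eq (fun i => P (i + 1)) a b, if_pos (show a < b by omega)]
    by_cases hp : P (a + 1)
    · simp only [hp, if_pos]
      omega
    · simp only [hp, Bool.false_eq_true, not_false_eq_true, if_neg]
      exact ih (a + 1) (by omega)

-- window condition expressed on the source list
def condS (s : List Int) (k th : Int) (i : Int) : Bool :=
  decide ((s.take (i + k).toNat).sum - (s.take i.toNat).sum ≤ th)

lemma F_cond_eq_G (k th : Int) (hk : 1 ≤ k) : ∀ (s : List Int),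
    k ≤ (s.length : Int) →
    F (condS s k th) 0 ((s.length : Int) - k + 1) = G k th s := by
  intro s
  induction s with
  | nil => intro h; simp at h; omega
  | cons p t ih =>
    intro hlen
    have hn : ((p :: t).length : Int) = (t.length : Int) + 1 := by simp
    have hnl : ¬ ((p :: t).length : Int) < k := not_lt.mpr hlen
    rw [F_eq, if_pos (show (0:Int) < ((p :: t).length : Int) - k + 1 by omega)]
    by_cases hc : condS (p :: t) k th 0
    · have hsum : ((p :: t).take k.toNat).sum ≤ th := by
        have := of_decide_eq_true hc
        simpa [condS] using this
      rw [if_pos hc]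
      simp only [G]
      rw [if_neg hnl, if_pos hsum]
    · have hsum : ¬ ((p :: t).take k.toNat).sum ≤ th := by simpa [condS] using hc
      rw [if_neg hc]
      have hb : ((p :: t).length : Int) - k + 1 = ((t.length : Int) - k + 1) + 1 := by
        rw [hn]; ring
      rw [hb, show (0 : Int) + 1 = 0 + 1 by ring]
      rw [F_shift (condS (p :: t) k th) 0 ((t.length : Int) - k + 1)]
      have hcong : F (fun i => condS (p :: t) k th (i + 1)) 0 ((t.length : Int) - k + 1)
          = F (condS t k th) 0 ((t.length : Int) - k + 1) := by
        apply F_congr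
        intro i h1 h2
        have h1' : (0:Int) ≤ i := h1
        simp only [condS]
        have e1 : (i + 1 + k).toNat = (i + k).toNat + 1 := by omega
        have e2 : (i + 1).toNat = i.toNat + 1 := by omega
        rw [e1, e2]
        simp only [List.take_succ_cons, List.sum_cons, decide_eq_decide]
        constructor <;> intro h <;> omega
      rw [hcong]
      simp only [G]
      rw [if_neg hnl, if_neg hsum]
      by_cases hkt : k ≤ (t.length : Int)
      · rw [ih hkt]
      · have hk0 : (t.length : Int) - k + 1 = 0 := by rw [hn] at hlen; omega
        rw [hk0, F_eq, if_neg (show ¬ (0:Int) < 0 by omega)]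
        rw [G_small k th t (by omega)]

lemma take_sum_succ (s : List Int) (j : Nat) (hj : j < s.length) :
    (s.take (j + 1)).sum = (s.take j).sum + s[j] := by
  rw [List.sum_take_succ]

lemma windowLoop_eq_F (s : List Int) (k th : Int) (hk : 1 ≤ k) (hkn : k ≤ (s.length : Int)) :
    ∀ (a : Int), 0 ≤ a → a ≤ (s.length : Int) - k →
    altWindowLoop s k th (s.length : Int)
        ((s.take (a + k).toNat).sum - (s.take a.toNat).sum)
        (PySem.List.pyRange a ((s.length : Int) - k) 1)
      = F (condS s k th) a ((s.length : Int) - k + 1) := by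
  intro a
  induction hm : (((s.length : Int) - k) - a).toNat generalizing a with
  | zero =>
    intro h0 hle
    have ha : a = (s.length : Int) - k := by omega
    rw [PySem.List.pyRange_one_eq_nil (by omega)]
    rw [F_eq, if_pos (by omega)]
    by_cases hc : condS s k th a
    · have hw : (s.take (a + k).toNat).sum - (s.take a.toNat).sum ≤ th := by
        have := of_decide_eq_true hc
        simpa [condS] using this
      simp only [altWindowLoop, if_pos hw, if_pos hc]
      omega
    · have hw : ¬ (s.take (a + k).toNat).sum - (s.take a.toNat).sum ≤ th := by
        simpa [condS] using hc
      simp only [altWindowLoop, if_neg hw, if_neg hc]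
      rw [F_eq, if_neg (by omega)]
  | succ m ih =>
    intro h0 hle
    rw [PySem.List.pyRange_one_cons (by omega)]
    rw [F_eq, if_pos (by omega)]
    by_cases hc : condS s k th a
    · have hw : (s.take (a + k).toNat).sum - (s.take a.toNat).sum ≤ th := by
        have := of_decide_eq_true hc
        simpa [condS] using this
      simp only [altWindowLoop, if_pos hw, if_pos hc]
    · have hw : ¬ (s.take (a + k).toNat).sum - (s.take a.toNat).sum ≤ th := by
        simpa [condS] using hc
      simp only [altWindowLoop, if_neg hw, if_neg hc]
      have hak : (a + k).toNat < s.length := by omega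
      have haa : a.toNat < s.length := by omega
      rw [PySem.List.pyGet?_of_nonneg _ (by omega : (0:Int) ≤ a + k)]
      rw [PySem.List.pyGet?_of_nonneg _ (by omega : (0:Int) ≤ a)]
      rw [List.getElem?_eq_getElem hak, List.getElem?_eq_getElem haa]
      have hwin : (s.take (a + k).toNat).sum - (s.take a.toNat).sum
            + (Option.getD (some s[(a + k).toNat]) 0) - (Option.getD (some s[a.toNat]) 0)
          = (s.take (a + 1 + k).toNat).sum - (s.take (a + 1).toNat).sum := by
        simp only [Option.getD_some]
        have e1 : (a + 1 + k).toNat = (a + k).toNat + 1 := by omega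
        have e2 : (a + 1).toNat = a.toNat + 1 := by omega
        rw [e1, e2, take_sum_succ s (a + k).toNat hak, take_sum_succ s a.toNat haa]
        ring
      rw [hwin]
      exact ih (a + 1) (by omega) (by omega) (by omega)

-- ===== VERDICT =====
theorem reducegifts_spec : Claim_equal_reducegifts := by
  intro prices k threshold _ hk
  unfold Pre_reducegifts at hk
  rcases hk with hk' | ⟨rfl, hth⟩
  case inr =>
    unfold Spec_reducegifts reducegifts reducegifts_alt
    set s := PySem.List.sorted prices (fun x => x) true with hs
    have hw0 : (PySem.List.slice s none (some 0)).sum ≤ threshold := by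
      rw [PySem.List.slice_to s le_rfl]
      simpa using hth
    rw [reducegiftsAux.eq_def]
    rw [if_pos (show ((s.length : Int)) ≥ 0 by omega)]
    rw [if_pos hw0]
    rw [if_neg (show ¬ ((s.length : Int)) < 0 by omega)]
    rw [show ((s.length : Int)) - 0 = (s.length : Int) by ring]
    by_cases hpos : (0:Int) < (s.length : Int)
    · rw [PySem.List.pyRange_one_cons hpos]
      simp only [altWindowLoop]
      rw [if_pos hw0]
    · rw [PySem.List.pyRange_one_eq_nil (by omega)]
      simp only [altWindowLoop]
      rw [if_pos hw0]
      omega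
  unfold Spec_reducegifts reducegifts reducegifts_alt
  set s := PySem.List.sorted prices (fun x => x) true with hs
  rw [aux_eq_G k threshold hk' s 0]
  by_cases hlt : ((s.length : Int)) < k
  · simp only [hlt, if_pos]
    rw [G_small k threshold s hlt]
    simp
  · simp only [hlt, if_neg, not_false_eq_true]
    rw [PySem.List.slice_to s (by omega : (0:Int) ≤ k)]
    have h0 : ((s.take ((0:Int) + k).toNat).sum - (s.take (0:Int).toNat).sum) = (s.take k.toNat).sum := by
      simp
    rw [show (s.take k.toNat).sum = (s.take ((0:Int) + k).toNat).sum - (s.take (0:Int).toNat).sum by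
      rw [h0]]
    rw [windowLoop_eq_F s k threshold hk' (by omega) 0 le_rfl (by omega)]
    rw [F_cond_eq_G k threshold hk' s (by omega)]
    simp
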